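-- pv_equiv track=rewrite | github.com/oxfordmmm/applymask | test/detect_mask.py | catwalk_simulator
-- ===== SOURCE A (Python) =====
-- def catwalk_simulator(seq1, seq2, mask, use_mask):
--     position = []
--     if len(seq1) == len(seq2):
--         for i, (x, y) in enumerate(zip(seq1, seq2)):
--             if x != y:
--                 if i not in mask or not use_mask:
--                     position.append(i)
--     return position
-- ===== SOURCE B (Python) =====
-- def catwalk_simulator(seq1, seq2, mask, use_mask):
--     if len(seq1) != len(seq2):
--         return []
--     diffs = [i for i, (x, y) in enumerate(zip(seq1, seq2)) if x != y]
--     if not use_mask: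
--         return diffs
--     # subtract the mask from the (ascending) diff positions by a two-pointer
--     # merge against the sorted deduplicated mask: no per-position membership test
--     banned = sorted(set(mask))
--     out = []
--     j = 0
--     for i in diffs:
--         while j < len(banned) and banned[j] < i:
--             j += 1
--         if j == len(banned) or banned[j] != i:
--             out.append(i)
--     return out
-- ===== Notes on version B (the rewrite author's own statement) =====
-- stated objective: alternative
-- what changed: B computes the ascending list of differing positions first, then removes masked positions by a two-pointer merge against the sorted deduplicated mask (advancing one shared cursor) instead of A's per-position membership scan of mask inside the comparison loop.
import Mathlib
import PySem

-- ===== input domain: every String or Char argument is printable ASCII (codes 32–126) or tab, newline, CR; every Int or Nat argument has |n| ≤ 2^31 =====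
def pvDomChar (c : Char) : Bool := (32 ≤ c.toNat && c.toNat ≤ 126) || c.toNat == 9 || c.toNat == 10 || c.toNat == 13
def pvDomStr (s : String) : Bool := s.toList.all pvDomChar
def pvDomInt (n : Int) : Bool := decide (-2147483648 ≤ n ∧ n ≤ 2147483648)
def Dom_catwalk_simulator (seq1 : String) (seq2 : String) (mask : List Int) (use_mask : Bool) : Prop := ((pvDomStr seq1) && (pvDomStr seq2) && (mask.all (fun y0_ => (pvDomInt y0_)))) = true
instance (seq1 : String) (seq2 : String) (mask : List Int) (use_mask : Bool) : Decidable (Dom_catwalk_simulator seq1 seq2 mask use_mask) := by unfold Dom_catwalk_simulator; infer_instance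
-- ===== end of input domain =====

-- B computes the ascending differing positions first, then removes masked ones by a
-- two-pointer merge against the sorted deduplicated mask; same return value as A.

-- ===== PORT A =====
def catwalk_simulator (seq1 : String) (seq2 : String) (mask : List Int) (use_mask : Bool) : List Int :=
  let position : List Int := []
  if seq1.toList.length = seq2.toList.length then
    (PySem.List.enumerate (seq1.toList.zip seq2.toList) 0).foldl
      (fun acc p =>
        if p.2.1 ≠ p.2.2 then
          if ¬ (p.1 ∈ mask) ∨ use_mask = false then acc ++ [p.1] else acc
        else acc) position
  else position

-- ===== PORT B =====
-- the inner `while j < len(banned) and banned[j] < i: j += 1` of Source B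
-- (banned[j] is guarded by j < len(banned), so getD is exact here)
def pvAdvance (banned : List Int) (i : Int) (j : Nat) : Nat :=
  if j < banned.length then
    if banned.getD j 0 < i then pvAdvance banned i (j + 1) else j
  else j
termination_by banned.length - j

-- one iteration of Source B's `for i in diffs` loop, state = (out, j)
def pvStep (banned : List Int) (s : List Int × Nat) (i : Int) : List Int × Nat :=
  let j := pvAdvance banned i s.2
  if decide (j = banned.length) || (banned.getD j 0 != i) then (s.1 ++ [i], j) else (s.1, j)

def catwalk_simulator_alt (seq1 : String) (seq2 : String) (mask : List Int) (use_mask : Bool) : List Int :=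
  if seq1.toList.length ≠ seq2.toList.length then []
  else
    let diffs : List Int :=
      ((PySem.List.enumerate (seq1.toList.zip seq2.toList) 0).filter
        (fun p => p.2.1 != p.2.2)).map (·.1)
    if use_mask = false then diffs
    else
      let banned : List Int := PySem.List.sorted (PySem.Set.ofList mask) (fun x => x) false
      (diffs.foldl (pvStep banned) ([], 0)).1

-- ===== PRECONDITION & SPEC =====
def Spec_catwalk_simulator (seq1 : String) (seq2 : String) (mask : List Int) (use_mask : Bool) (out : List Int) : Prop := out = catwalk_simulator_alt seq1 seq2 mask use_mask
instance (seq1 : String) (seq2 : String) (mask : List Int) (use_mask : Bool) (out : List Int) : Decidable (Spec_catwalk_simulator seq1 seq2 mask use_mask out) := by unfold Spec_catwalk_simulator; infer_instance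

-- ===== CLAIM (what is proved, stated in full; the proofs are below) =====
def Claim_equal_catwalk_simulator : Prop := ∀ (seq1 : String) (seq2 : String) (mask : List Int) (use_mask : Bool), Dom_catwalk_simulator seq1 seq2 mask use_mask → Spec_catwalk_simulator seq1 seq2 mask use_mask (catwalk_simulator seq1 seq2 mask use_mask)

-- ===== LEMMAS AND PROOFS =====

theorem pvAdvance_ge (banned : List Int) (i : Int) (j : Nat) : j ≤ pvAdvance banned i j := by
  unfold pvAdvance
  split
  · split
    · exact le_trans (Nat.le_succ j) (pvAdvance_ge banned i (j + 1))
    · exact le_refl j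
  · exact le_refl j
termination_by banned.length - j

theorem pvAdvance_le_len (banned : List Int) (i : Int) (j : Nat) (hj : j ≤ banned.length) :
    pvAdvance banned i j ≤ banned.length := by
  unfold pvAdvance
  split
  · split
    · exact pvAdvance_le_len banned i (j + 1) (by omega)
    · exact hj
  · exact hj
termination_by banned.length - j

theorem pvAdvance_skipped (banned : List Int) (i : Int) (j : Nat) :
    ∀ k, j ≤ k → k < pvAdvance banned i j → banned.getD k 0 < i := by
  unfold pvAdvance
  split
  · rename_i h
    split
    · rename_i hlt
      intro k hjk hka
      rcases Nat.eq_or_lt_of_le hjk with rfl | hjk'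
      · exact hlt
      · exact pvAdvance_skipped banned i (j + 1) k hjk' hka
    · intro k hjk hka; omega
  · intro k hjk hka; omega
termination_by banned.length - j

theorem getD_eq_getElem_of_lt (l : List Int) (k : Nat) (hk : k < l.length) :
    l.getD k 0 = l[k] := by
  simp [List.getD_eq_getElem?_getD, List.getElem?_eq_getElem hk]

theorem pvAdvance_stop (banned : List Int) (i : Int) (j : Nat)
    (h : pvAdvance banned i j < banned.length) :
    i ≤ banned.getD (pvAdvance banned i j) 0 := by
  by_cases hjl : j < banned.length
  · by_cases hlt : banned.getD j 0 < i
    · have heq : pvAdvance banned i j = pvAdvance banned i (j + 1) := by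
        rw [getD_eq_getElem_of_lt banned j hjl] at hlt
        rw [pvAdvance]; simp [hjl, hlt]
      rw [heq] at h ⊢
      exact pvAdvance_stop banned i (j + 1) h
    · have heq : pvAdvance banned i j = j := by
        rw [getD_eq_getElem_of_lt banned j hjl] at hlt
        rw [pvAdvance]; simp [hjl, hlt]
      rw [heq]; omega
  · have heq : pvAdvance banned i j = j := by
      rw [pvAdvance]; simp [hjl]
    rw [heq] at h; omega
termination_by banned.length - j

-- membership in a strictly sorted list, characterised at the cursor returned by pvAdvance
theorem pvAdvance_mem_iff (banned : List Int) (hb : banned.Pairwise (· < ·)) (i : Int) (j : Nat)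
    (hbefore : ∀ k, k < j → banned.getD k 0 < i) :
    (i ∈ banned) ↔ (pvAdvance banned i j < banned.length ∧
        banned.getD (pvAdvance banned i j) 0 = i) := by
  set a := pvAdvance banned i j with ha
  constructor
  · intro hm
    obtain ⟨k, hk, hki⟩ := List.mem_iff_getElem.mp hm
    rcases lt_trichotomy k a with hka | hka | hka
    · exfalso
      have hlt : banned.getD k 0 < i := by
        by_cases hjk : j ≤ k
        · exact pvAdvance_skipped banned i j k hjk hka
        · exact hbefore k (by omega)
      rw [getD_eq_getElem_of_lt banned k hk, hki] at hlt
      exact lt_irrefl i hlt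
    · subst hka
      exact ⟨hk, by rw [getD_eq_getElem_of_lt banned a hk, hki]⟩
    · exfalso
      have haL : a < banned.length := lt_trans hka hk
      have hstop : i ≤ banned.getD a 0 := pvAdvance_stop banned i j haL
      rw [getD_eq_getElem_of_lt banned a haL] at hstop
      have : banned[a] < banned[k] := List.pairwise_iff_getElem.mp hb a k haL hk hka
      rw [hki] at this; omega
  · rintro ⟨hL, hget⟩
    rw [← hget, getD_eq_getElem_of_lt banned a hL]
    exact List.getElem_mem hL

-- main two-pointer loop invariant: the fold over ascending diffs filters out banned positions
theorem twoPointer_loop (banned : List Int) (hb : banned.Pairwise (· < ·)) :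
    ∀ (diffs : List Int), diffs.Pairwise (· < ·) →
    ∀ (j : Nat) (acc : List Int), j ≤ banned.length →
    (∀ k, k < j → ∀ i ∈ diffs, banned.getD k 0 < i) →
    (diffs.foldl (pvStep banned) (acc, j)).1 =
      acc ++ diffs.filter (fun i => decide (¬ i ∈ banned)) := by
  intro diffs
  induction diffs with
  | nil => intro _ j acc _ _; simp
  | cons i t ih =>
    intro hd j acc hj hbefore
    have hdt : t.Pairwise (· < ·) := hd.of_cons
    have hit : ∀ i2 ∈ t, i < i2 := fun i2 h2 => (List.pairwise_cons.mp hd).1 i2 h2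
    set a := pvAdvance banned i j with ha
    have hale : a ≤ banned.length := pvAdvance_le_len banned i j hj
    have hmem : (i ∈ banned) ↔ (a < banned.length ∧ banned.getD a 0 = i) :=
      pvAdvance_mem_iff banned hb i j
        (fun k hkj => hbefore k hkj i List.mem_cons_self)
    have hnextinv : ∀ k, k < a → ∀ i2 ∈ t, banned.getD k 0 < i2 := by
      intro k hka i2 h2
      have hlt_i : banned.getD k 0 < i := by
        by_cases hjk : j ≤ k
        · exact pvAdvance_skipped banned i j k hjk hka
        · exact hbefore k (by omega) i List.mem_cons_self
      exact lt_trans hlt_i (hit i2 h2)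
    simp only [List.foldl_cons]
    by_cases him : i ∈ banned
    · obtain ⟨hL, hget⟩ := hmem.mp him
      have hstep : pvStep banned (acc, j) i = (acc, a) := by
        unfold pvStep
        simp [← ha, Nat.ne_of_lt hL, -List.getD_eq_getElem?_getD, hget]
      rw [hstep, ih hdt a acc hale hnextinv]
      simp [him]
    · have hc : (decide (a = banned.length) || (banned.getD a 0 != i)) = true := by
        by_cases haL : a < banned.length
        · have : banned.getD a 0 ≠ i := fun h => him (hmem.mpr ⟨haL, h⟩)
          simp only [Bool.or_eq_true, bne_iff_ne, ne_eq, decide_eq_true_eq]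
          exact Or.inr this
        · simp [show a = banned.length by omega]
      have hstep : pvStep banned (acc, j) i = (acc ++ [i], a) := by
        unfold pvStep
        simp only [← ha, hc, if_true]
      rw [hstep, ih hdt a (acc ++ [i]) hale hnextinv]
      simp [him]

theorem catwalk_fold_eq_filter_map (l : List (Int × Char × Char)) (mask : List Int) (use_mask : Bool) :
    l.foldl (fun acc p =>
        if p.2.1 ≠ p.2.2 then
          if ¬ (p.1 ∈ mask) ∨ use_mask = false then acc ++ [p.1] else acc
        else acc) [] =
    (l.filter (fun p => decide (p.2.1 ≠ p.2.2) && decide (¬ p.1 ∈ mask ∨ use_mask = false))).map (·.1) := by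
  have h : (fun (acc : List Int) (p : Int × Char × Char) =>
        if p.2.1 ≠ p.2.2 then
          if ¬ (p.1 ∈ mask) ∨ use_mask = false then acc ++ [p.1] else acc
        else acc) =
      (fun acc p =>
        if (decide (p.2.1 ≠ p.2.2) && decide (¬ p.1 ∈ mask ∨ use_mask = false)) = true
        then acc ++ [(·.1) p] else acc) := by
    funext acc p
    by_cases h1 : p.2.1 = p.2.2 <;> by_cases h2 : ¬ p.1 ∈ mask ∨ use_mask = false <;> simp [h1, h2]
  rw [h, PySem.List.foldl_append_if]
  simp

theorem diffs_pairwise (l : List (Char × Char)) :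
    (((PySem.List.enumerate l 0).filter (fun p => p.2.1 != p.2.2)).map (·.1)).Pairwise (· < ·) := by
  rw [List.pairwise_map]
  exact (PySem.List.pairwise_lt_enumerate l 0).filter _

theorem catwalk_equal (seq1 seq2 : String) (mask : List Int) (use_mask : Bool) :
    catwalk_simulator seq1 seq2 mask use_mask = catwalk_simulator_alt seq1 seq2 mask use_mask := by
  unfold catwalk_simulator catwalk_simulator_alt
  by_cases hlen : seq1.toList.length = seq2.toList.length
  · rw [if_pos hlen, if_neg (by simpa using hlen)]
    rw [catwalk_fold_eq_filter_map]
    cases use_mask with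
    | false =>
      rw [if_pos rfl]
      refine congrArg _ ?_
      apply List.filter_congr
      intro p _
      by_cases h : p.2.1 = p.2.2 <;> simp [h, bne]
    | true =>
      rw [if_neg (by decide)]
      set banned : List Int := PySem.List.sorted (PySem.Set.ofList mask) (fun x => x) false with hban
      have hb : banned.Pairwise (· < ·) := PySem.List.sorted_ofList_pairwise_lt mask
      have hmemb : ∀ i : Int, i ∈ banned ↔ i ∈ mask := by
        intro i
        rw [hban, PySem.List.mem_sorted, PySem.Set.mem_ofList]
      rw [twoPointer_loop banned hb _ (diffs_pairwise _) 0 [] (Nat.zero_le _) (by omega)]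
      simp only [List.nil_append]
      rw [List.filter_map, List.filter_filter]
      refine congrArg _ ?_
      apply List.filter_congr
      intro p _
      by_cases h : p.2.1 = p.2.2 <;> simp [h, hmemb, Bool.and_comm, bne]
  · rw [if_neg hlen, if_pos hlen]

-- ===== VERDICT (by name: the statement is the Claim_ definition above) =====
theorem catwalk_simulator_spec : Claim_equal_catwalk_simulator := by
  intro seq1 seq2 mask use_mask _
  exact catwalk_equal seq1 seq2 mask use_mask
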